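-- pv_equiv track=rewrite | github.com/alsoknownasfoo/SpinRender | tools/theme_validator/yaml_parser.py | categorize_tokens
-- ===== SOURCE A (Python) =====
-- from typing import Any, Dict, Set
--
-- CATEGORIES = ['palette', 'colors', 'glyphs', 'text', 'spacing', 'borders', 'components']
--
-- def categorize_tokens(all_tokens: Set[str]) -> Dict[str, Set[str]]:
--     """Categorize tokens by top-level section.
--
--     Args:
--         all_tokens: Set of all token paths
--
--     Returns:
--         Dict with keys for each category and 'all'
--     """
--     result = {cat: set() for cat in CATEGORIES}
--     result['all'] = all_tokens.copy()
--
--     for token in all_tokens: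
--         # Top-level category is first segment before dot
--         top_level = token.split('.')[0]
--         if top_level in result:
--             result[top_level].add(token)
--
--     return result
-- ===== SOURCE B (Python) =====
-- from typing import Dict, Set
--
-- CATEGORIES = ['palette', 'colors', 'glyphs', 'text', 'spacing', 'borders', 'components']
--
-- def categorize_tokens(all_tokens: Set[str]) -> Dict[str, Set[str]]:
--     """Categorize tokens by top-level section (per-category filtering)."""
--     result = {cat: {t for t in all_tokens if t.split('.')[0] == cat}
--               for cat in CATEGORIES}
--     result['all'] = all_tokens.copy()
--     return result
-- ===== Notes on version B (the rewrite author's own statement) =====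
-- stated objective: simpler
-- what changed: Replaces the single accumulating pass (membership-tested dict of mutated sets) by a declarative dict built per category with a set comprehension filtering all tokens, plus the 'all' copy.
import Mathlib
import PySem

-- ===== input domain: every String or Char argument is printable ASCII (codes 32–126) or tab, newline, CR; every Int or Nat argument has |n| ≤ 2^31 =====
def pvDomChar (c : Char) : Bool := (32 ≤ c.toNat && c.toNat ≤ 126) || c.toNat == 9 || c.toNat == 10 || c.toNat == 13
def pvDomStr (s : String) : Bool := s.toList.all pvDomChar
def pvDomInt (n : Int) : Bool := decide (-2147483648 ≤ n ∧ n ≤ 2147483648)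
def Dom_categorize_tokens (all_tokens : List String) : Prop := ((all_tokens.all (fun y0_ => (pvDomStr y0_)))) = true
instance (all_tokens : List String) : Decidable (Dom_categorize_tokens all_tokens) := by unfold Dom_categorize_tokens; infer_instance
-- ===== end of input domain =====

-- B replaces A's single accumulating loop over tokens by a per-category filter comprehension (simpler, declarative); same dict.


-- ===== PORT A =====
-- CATEGORIES (module constant, used by both versions)
def pyCATEGORIES : List String :=
  ["palette", "colors", "glyphs", "text", "spacing", "borders", "components"]

-- token.split('.')[0]  (split? is some for the non-empty separator "."; the list is non-empty, so the defaults are never read)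
def topLevel (token : String) : String :=
  PySem.List.pyGetD ((PySem.Str.split? token ".").getD []) 0 ""

-- the body of A's `for token in all_tokens` loop
def catStepA (d : PySem.Dict String (PySem.Set String)) (token : String) :
    PySem.Dict String (PySem.Set String) :=
  if d.contains (topLevel token) then
    d.modify (topLevel token) PySem.Set.empty (fun s => PySem.Set.add s token)
  else d

def categorize_tokens (all_tokens : List String) : List (String × List String) :=
  (all_tokens.foldl catStepA
      ((pyCATEGORIES.foldl (fun d cat => d.insert cat PySem.Set.empty)
          PySem.Dict.empty).insert "all" all_tokens)).items

-- ===== PORT B =====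
def categorize_tokens_alt (all_tokens : List String) : List (String × List String) :=
  pyCATEGORIES.map (fun cat =>
      (cat, PySem.Set.ofList (all_tokens.filter (fun t => topLevel t == cat))))
    ++ [("all", all_tokens)]

-- ===== PRECONDITION & SPEC =====
def Spec_categorize_tokens (all_tokens : List String) (out : List (String × List String)) : Prop := out = categorize_tokens_alt all_tokens
instance (all_tokens : List String) (out : List (String × List String)) : Decidable (Spec_categorize_tokens all_tokens out) := by unfold Spec_categorize_tokens; infer_instance

-- ===== CLAIM (what is proved, stated in full; the proofs are below) =====
def Claim_equal_categorize_tokens : Prop := ∀ (all_tokens : List String), Dom_categorize_tokens all_tokens → Spec_categorize_tokens all_tokens (categorize_tokens all_tokens)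

-- ===== LEMMAS AND PROOFS =====

-- with nodup keys, the first match of key k in the items list is the unique entry with that key
lemma getD_eq_of_mem {L : List (String × PySem.Set String)}
    (hnd : (L.map Prod.fst).Nodup) {p : String × PySem.Set String} (hp : p ∈ L) :
    (PySem.Dict.mk L).getD p.1 PySem.Set.empty = p.2 := by
  induction L with
  | nil => cases hp
  | cons q L ih =>
    simp only [List.map_cons, List.nodup_cons, List.mem_map] at hnd
    rcases List.mem_cons.mp hp with h | h
    · subst h
      simp [PySem.Dict.getD, PySem.Dict.get?]
    · have hne : (q.1 == p.1) = false := by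
        apply beq_eq_false_iff_ne.mpr
        intro he
        exact hnd.1 ⟨p, h, he.symm⟩
      simpa [PySem.Dict.getD, PySem.Dict.get?, hne] using ih hnd.2 h

-- one loop iteration of A acts entrywise on the items list
lemma catStepA_items (L : List (String × PySem.Set String))
    (hnd : (L.map Prod.fst).Nodup) (t : String) :
    (catStepA (PySem.Dict.mk L) t).items
      = L.map (fun p => (p.1, if topLevel t == p.1 then PySem.Set.add p.2 t else p.2)) := by
  unfold catStepA
  by_cases hc : (PySem.Dict.mk L).contains (topLevel t) = true
  · simp only [hc, if_true, PySem.Dict.modify, PySem.Dict.insert]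
    apply List.map_congr_left
    intro p hp
    by_cases hk : p.1 = topLevel t
    · have h2 : (PySem.Dict.mk L).getD (topLevel t) PySem.Set.empty = p.2 :=
        hk ▸ getD_eq_of_mem hnd hp
      simp only [hk, beq_self_eq_true, if_true]
      exact congrArg (fun s => (topLevel t, PySem.Set.add s t)) h2
    · have hkb : (p.1 == topLevel t) = false := beq_eq_false_iff_ne.mpr hk
      have hkb2 : (topLevel t == p.1) = false := beq_eq_false_iff_ne.mpr (fun he => hk he.symm)
      simp [hkb, hkb2]
  · have hall : ∀ p ∈ L, (topLevel t == p.1) = false := by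
      intro p hp
      apply beq_eq_false_iff_ne.mpr
      intro he
      exact hc (List.any_eq_true.mpr ⟨p, hp, beq_iff_eq.mpr he.symm⟩)
    have hcf : (PySem.Dict.mk L).contains (topLevel t) = false := Bool.eq_false_iff.mpr hc
    simp only [hcf, Bool.false_eq_true, if_false]
    symm
    calc L.map (fun p => (p.1, if topLevel t == p.1 then PySem.Set.add p.2 t else p.2))
        = L.map id := List.map_congr_left (fun p hp => by simp [hall p hp])
      _ = L := List.map_id L

-- A's whole loop acts entrywise: every entry accumulates exactly its matching tokens
lemma foldA_items (ts : List String) (L : List (String × PySem.Set String))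
    (hnd : (L.map Prod.fst).Nodup) :
    (ts.foldl catStepA (PySem.Dict.mk L)).items
      = L.map (fun p =>
          (p.1, ts.foldl (fun s t => if topLevel t == p.1 then PySem.Set.add s t else s) p.2)) := by
  induction ts generalizing L with
  | nil => simp
  | cons t ts ih =>
    have hstep := catStepA_items L hnd t
    have hL' : catStepA (PySem.Dict.mk L) t
        = PySem.Dict.mk (L.map (fun p => (p.1, if topLevel t == p.1 then PySem.Set.add p.2 t else p.2))) :=
      PySem.Dict.ext hstep
    have hnd' : ((L.map (fun p => (p.1, if topLevel t == p.1 then PySem.Set.add p.2 t else p.2))).map Prod.fst).Nodup := by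
      simpa [List.map_map, Function.comp] using hnd
    simp only [List.foldl_cons, hL', ih _ hnd', List.map_map]
    apply List.map_congr_left
    intro p _
    simp [Function.comp]

-- a conditional-add loop over tokens all of which are already members leaves the set unchanged
lemma foldl_cond_add_of_subset (c : String) (ts : List String) (v : PySem.Set String)
    (h : ∀ t ∈ ts, t ∈ v) :
    ts.foldl (fun s t => if topLevel t == c then PySem.Set.add s t else s) v = v := by
  induction ts with
  | nil => rfl
  | cons t ts ih =>
    have hv : PySem.Set.add v t = v := PySem.Set.add_of_mem (h t (List.mem_cons_self))
    have hrest : ∀ u ∈ ts, u ∈ v := fun u hu => h u (List.mem_cons_of_mem _ hu)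
    rw [List.foldl_cons]
    by_cases hc : (topLevel t == c) = true
    · rw [if_pos hc, hv]; exact ih hrest
    · rw [if_neg (by simp [hc])]; exact ih hrest

-- the conditional-add loop from the empty set is exactly set(filter)
lemma foldl_cond_add_eq_ofList (c : String) (ts : List String) :
    ts.foldl (fun s t => if topLevel t == c then PySem.Set.add s t else s) PySem.Set.empty
      = PySem.Set.ofList (ts.filter (fun t => topLevel t == c)) := by
  rw [PySem.Set.ofList_eq_foldl, List.foldl_filter]
  rfl

-- A's initial dict (7 empty category sets, then 'all' ↦ the tokens), as an items list
lemma init_items (all_tokens : List String) :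
    ((pyCATEGORIES.foldl (fun d cat => d.insert cat PySem.Set.empty) PySem.Dict.empty).insert "all" all_tokens)
      = PySem.Dict.mk (pyCATEGORIES.map (fun c => (c, PySem.Set.empty)) ++ [("all", all_tokens)]) := by
  rfl

-- ===== VERDICT (by name: the statement is the Claim_ definition above) =====
theorem categorize_tokens_spec : Claim_equal_categorize_tokens := by
  intro all_tokens _
  unfold Spec_categorize_tokens categorize_tokens categorize_tokens_alt
  rw [init_items]
  have hnd : (((pyCATEGORIES.map (fun c => (c, PySem.Set.empty))) ++ [("all", (all_tokens : PySem.Set String))]).map Prod.fst).Nodup := by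
    simp [pyCATEGORIES]
  rw [foldA_items all_tokens _ hnd]
  rw [List.map_append, List.map_map]
  congr 1
  · apply List.map_congr_left
    intro c _
    simp only [Function.comp]
    rw [foldl_cond_add_eq_ofList]
  · simp only [List.map_cons, List.map_nil]
    rw [foldl_cond_add_of_subset "all" all_tokens all_tokens (fun t ht => ht)]
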